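-- pv_equiv track=rewrite | github.com/xtangxtang/gp-quant | src/strategy/monthly_phase.py | smooth_regime_with_hysteresis
-- ===== SOURCE A (Python) =====
-- def smooth_regime_with_hysteresis(raw: list[str], persist: int = 2) -> list[str]:
--     if not raw:
--         return raw
--     persist = max(1, int(persist))
--     smoothed: list[str] = [raw[0]]
--     pending: str | None = None
--     pending_count = 0
--
--     for r in raw[1:]:
--         cur = smoothed[-1]
--         if r == cur:
--             pending = None
--             pending_count = 0
--             smoothed.append(cur)
--             continue
--
--         if pending == r:
--             pending_count += 1
--         else:
--             pending = r
--             pending_count = 1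
--
--         if pending_count >= persist:
--             smoothed.append(r)
--             pending = None
--             pending_count = 0
--         else:
--             smoothed.append(cur)
--
--     return smoothed
-- ===== SOURCE B (Python) =====
-- def smooth_regime_with_hysteresis(raw: list[str], persist: int = 2) -> list[str]:
--     if not raw:
--         return raw
--     persist = max(1, int(persist))
--     out: list[str] = []
--     cur = raw[0]
--     i, n = 0, len(raw)
--     while i < n:
--         v = raw[i]
--         j = i + 1
--         while j < n and raw[j] == v:
--             j += 1
--         L = j - i  # length of the maximal run of v
--         if v == cur or L < persist:
--             out += [cur] * L
--         else:
--             out += [cur] * (persist - 1) + [v] * (L - persist + 1)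
--             cur = v
--         i = j
--     return out
-- ===== Notes on version B (the rewrite author's own statement) =====
-- stated objective: simpler
-- what changed: B replaces A's per-element pending/counter state machine by a single scan over maximal runs of equal values, emitting each run's whole output block at once ([cur]*L, or [cur]*(persist-1)+[v]*(L-persist+1) on a committed switch).
import Mathlib
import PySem

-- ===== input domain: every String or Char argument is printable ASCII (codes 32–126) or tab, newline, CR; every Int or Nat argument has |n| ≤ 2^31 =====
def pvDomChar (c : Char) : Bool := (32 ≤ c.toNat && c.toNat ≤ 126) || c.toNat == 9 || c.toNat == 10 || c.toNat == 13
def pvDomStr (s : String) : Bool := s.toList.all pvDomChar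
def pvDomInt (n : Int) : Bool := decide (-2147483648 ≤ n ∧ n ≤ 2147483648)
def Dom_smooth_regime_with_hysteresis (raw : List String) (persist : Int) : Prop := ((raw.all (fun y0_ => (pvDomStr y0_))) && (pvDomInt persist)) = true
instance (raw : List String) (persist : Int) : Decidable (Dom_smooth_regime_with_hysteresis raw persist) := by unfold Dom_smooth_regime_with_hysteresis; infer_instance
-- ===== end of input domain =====

-- B replaces A's element-by-element pending/counter state machine by a single scan over
-- maximal runs of equal values, emitting each run's output in one block (objective: simpler).

-- ===== PORT A =====
-- one iteration of A's for-loop; state = (smoothed, pending, pending_count)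
def pvAStep (persist : Int) (st : List String × Option String × Int) (r : String) :
    List String × Option String × Int :=
  let smoothed := st.1
  let pending := st.2.1
  let pendingCount := st.2.2
  let cur := smoothed.getLast!          -- smoothed[-1]; smoothed is always nonempty
  if r == cur then
    (smoothed ++ [cur], none, 0)
  else
    let pc : Option String × Int :=
      if pending == some r then (pending, pendingCount + 1) else (some r, 1)
    if pc.2 ≥ persist then
      (smoothed ++ [r], none, 0)
    else
      (smoothed ++ [cur], pc.1, pc.2)

def smooth_regime_with_hysteresis (raw : List String) (persist : Int) : List String :=
  match raw with
  | [] => raw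
  | r0 :: rest =>
    let persist := max 1 persist
    ((rest.foldl (pvAStep persist) ([r0], none, 0)).1)

-- ===== PORT B =====
-- B's while-loop over maximal runs: at each step take the run of the head value
-- (inner while j < n and raw[j] == v  ↔  takeWhile/dropWhile) and emit its block.
def pvBGo (persist : Int) (cur : String) : List String → List String
  | [] => []
  | v :: xs =>
    let same := xs.takeWhile (· == v)
    let rest := xs.dropWhile (· == v)
    let L : Int := 1 + same.length      -- run length
    if v == cur || decide (L < persist) then
      List.replicate L.toNat cur ++ pvBGo persist cur rest
    else
      List.replicate (persist - 1).toNat cur ++ List.replicate (L - persist + 1).toNat v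
        ++ pvBGo persist v rest
termination_by l => l.length
decreasing_by
  all_goals
    have := List.length_dropWhile_le (p := (· == v)) (l := xs)
    simp only [List.length_cons]
    omega

def smooth_regime_with_hysteresis_alt (raw : List String) (persist : Int) : List String :=
  match raw with
  | [] => raw
  | r0 :: _ => pvBGo (max 1 persist) r0 raw

-- ===== PRECONDITION & SPEC =====
def Spec_smooth_regime_with_hysteresis (raw : List String) (persist : Int) (out : List String) : Prop := out = smooth_regime_with_hysteresis_alt raw persist
instance (raw : List String) (persist : Int) (out : List String) : Decidable (Spec_smooth_regime_with_hysteresis raw persist out) := by unfold Spec_smooth_regime_with_hysteresis; infer_instance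

-- ===== CLAIM (what is proved, stated in full; the proofs are below) =====
def Claim_equal_smooth_regime_with_hysteresis : Prop := ∀ (raw : List String) (persist : Int), Dom_smooth_regime_with_hysteresis raw persist → Spec_smooth_regime_with_hysteresis raw persist (smooth_regime_with_hysteresis raw persist)

-- ===== LEMMAS AND PROOFS =====

theorem pvLast (s : List String) (x : String) : (s ++ [x]).getLast! = x := by
  simp

theorem pvBGo_nil (P : Int) (cur : String) : pvBGo P cur [] = [] := by
  rw [pvBGo.eq_def]

theorem pvBGo_cons (P : Int) (cur v : String) (xs : List String) :
    pvBGo P cur (v :: xs) =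
      (if v == cur || decide ((1 + ((xs.takeWhile (· == v)).length : Int)) < P) then
         List.replicate (1 + ((xs.takeWhile (· == v)).length : Int)).toNat cur
           ++ pvBGo P cur (xs.dropWhile (· == v))
       else
         List.replicate (P - 1).toNat cur
           ++ List.replicate ((1 + ((xs.takeWhile (· == v)).length : Int)) - P + 1).toNat v
           ++ pvBGo P v (xs.dropWhile (· == v))) := by
  rw [pvBGo.eq_def]

-- accumulator-free rendering of A's loop: cur is carried explicitly,
-- the function returns only the elements appended after the seed
def pvAGo (persist : Int) (cur : String) (pending : Option String) (cnt : Int) :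
    List String → List String
  | [] => []
  | r :: xs =>
    if r == cur then cur :: pvAGo persist cur none 0 xs
    else
      let pc : Option String × Int :=
        if pending == some r then (pending, cnt + 1) else (some r, 1)
      if pc.2 ≥ persist then r :: pvAGo persist r none 0 xs
      else cur :: pvAGo persist cur pc.1 pc.2 xs

theorem pvA_foldl (persist : Int) (xs : List String) :
    ∀ (s : List String) (p : Option String) (c : Int), s ≠ [] →
    (xs.foldl (pvAStep persist) (s, p, c)).1
      = s ++ pvAGo persist s.getLast! p c xs := by
  induction xs with
  | nil => intro s p c hs; simp [pvAGo]
  | cons r xs ih =>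
    intro s p c hs
    simp only [List.foldl_cons, pvAStep, pvAGo]
    by_cases h1 : r == s.getLast!
    · simp only [h1, if_pos]
      rw [ih _ _ _ (by simp)]
      simp [pvLast]
    · simp only [h1, Bool.false_eq_true, if_false]
      by_cases h2 : (if p == some r then (p, c + 1) else (some r, 1)).2 ≥ persist
      · simp only [h2, if_pos]
        rw [ih _ _ _ (by simp)]
        simp [pvLast]
      · simp only [h2, if_neg, not_false_iff]
        rw [ih _ _ _ (by simp)]
        simp [pvLast]

-- a pending value that cannot match the next element is irrelevant
theorem pvA_pending_irrel (persist : Int) (cur v : String) (k : Int) (rest : List String)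
    (h : ∀ w, rest.head? = some w → w ≠ v) :
    pvAGo persist cur (some v) k rest = pvAGo persist cur none 0 rest := by
  cases rest with
  | nil => rfl
  | cons w ws =>
    have hwv : w ≠ v := h w rfl
    simp only [pvAGo]
    by_cases h1 : w == cur
    · simp [h1]
    · have : (some v == some w) = false := by
        simp only [Option.some_beq_some, beq_eq_false_iff_ne, ne_eq]
        exact fun e => hwv e.symm
      simp [h1, this]

-- elements equal to cur are just copied through
theorem pvA_copy (persist : Int) (cur : String) :
    ∀ (t rest : List String), (∀ a ∈ t, a = cur) →
    pvAGo persist cur none 0 (t ++ rest)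
      = List.replicate t.length cur ++ pvAGo persist cur none 0 rest := by
  intro t
  induction t with
  | nil => intro rest _; simp
  | cons a t ih =>
    intro rest h
    have ha : a = cur := h a (by simp)
    simp only [List.cons_append, pvAGo, ha, beq_self_eq_true, if_pos, List.length_cons,
      List.replicate_succ, List.cons_append, if_true]
    rw [ih rest (fun x hx => h x (by simp [hx]))]

-- consuming a run of v with a live pending counter k (1 ≤ k < persist)
theorem pvA_run (persist : Int) (cur v : String) (hvc : v ≠ cur) :
    ∀ (t : List String), (∀ a ∈ t, a = v) → ∀ (k : Int), 1 ≤ k → k < persist →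
    ∀ (rest : List String), (∀ w, rest.head? = some w → w ≠ v) →
    pvAGo persist cur (some v) k (t ++ rest)
      = if (k + t.length : Int) ≥ persist then
          List.replicate (persist - 1 - k).toNat cur
            ++ List.replicate ((t.length : Int) - (persist - 1 - k)).toNat v
            ++ pvAGo persist v none 0 rest
        else
          List.replicate t.length cur ++ pvAGo persist cur none 0 rest := by
  intro t
  induction t with
  | nil =>
    intro _ k hk1 hkP rest hrest
    rw [if_neg (by simp; omega)]
    simpa using pvA_pending_irrel persist cur v k rest hrest
  | cons a t ih =>
    intro hall k hk1 hkP rest hrest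
    have ha : a = v := hall a (by simp)
    subst ha
    have hall' : ∀ x ∈ t, x = a := fun x hx => hall x (by simp [hx])
    have hvc' : (a == cur) = false := by
      simp only [beq_eq_false_iff_ne, ne_eq]; exact hvc
    simp only [List.cons_append, pvAGo, hvc', Bool.false_eq_true, if_false,
      beq_self_eq_true, if_pos, Option.some_beq_some, if_true]
    by_cases hsw : k + 1 ≥ persist
    · -- switch now: since k < persist, k + 1 = persist
      have hkp : k + 1 = persist := by omega
      rw [if_pos (by simpa using hsw)]
      rw [pvA_copy persist a t rest hall']
      rw [if_pos (by simp; omega)]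
      have h1 : (persist - 1 - k).toNat = 0 := by omega
      have h2 : (((t.length + 1 : Nat) : Int) - (persist - 1 - k)).toNat = t.length + 1 := by
        push_cast; omega
      simp only [List.length_cons, h1, h2, List.replicate_zero, List.nil_append]
      simp [List.replicate_succ]
    · rw [if_neg (by simpa using hsw)]
      rw [ih hall' (k + 1) (by omega) (by omega) rest hrest]
      by_cases hfin : (k + 1 + t.length : Int) ≥ persist
      · rw [if_pos hfin, if_pos (by simp only [List.length_cons]; push_cast at hfin ⊢; omega)]
        simp only [List.length_cons]
        have e1 : (persist - 1 - k).toNat = (persist - 1 - (k + 1)).toNat + 1 := by omega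
        have e2 : ((t.length : Int) - (persist - 1 - (k + 1))).toNat
            = (((t.length + 1 : Nat) : Int) - (persist - 1 - k)).toNat := by push_cast; omega
        rw [e1, e2]
        simp [List.replicate_succ]
      · rw [if_neg hfin, if_neg (by simp only [List.length_cons]; push_cast at hfin ⊢; omega)]
        simp [List.replicate_succ]

theorem pvTakeWhile_all (v : String) (xs : List String) :
    ∀ a ∈ xs.takeWhile (· == v), a = v := by
  intro a ha
  have := List.mem_takeWhile_imp ha
  simpa using this

theorem pvDropWhile_head (v : String) (xs : List String) :
    ∀ w, (xs.dropWhile (· == v)).head? = some w → w ≠ v := by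
  intro w hw he
  have := List.head?_dropWhile_not (p := (· == v)) (l := xs)
  rw [hw] at this
  simp [he] at this

-- main lemma: A's loop (with no live pending) equals B's run scan
theorem pvMain (persist : Int) (hP : 1 ≤ persist) :
    ∀ (n : Nat) (xs : List String), xs.length ≤ n → ∀ cur,
    pvAGo persist cur none 0 xs = pvBGo persist cur xs := by
  intro n
  induction n with
  | zero =>
    intro xs hlen cur
    have : xs = [] := by cases xs <;> simp_all
    subst this
    rw [pvBGo_nil]
    rfl
  | succ n ih =>
    intro xs hlen cur
    cases xs with
    | nil => rw [pvBGo_nil]; rfl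
    | cons v ys =>
      have hyd : ys = ys.takeWhile (· == v) ++ ys.dropWhile (· == v) :=
        (List.takeWhile_append_dropWhile).symm
      have htv := pvTakeWhile_all v ys
      have hresthead := pvDropWhile_head v ys
      have hrestlen : (ys.dropWhile (· == v)).length ≤ n := by
        have h1 : (ys.dropWhile (· == v)).length ≤ ys.length := List.length_dropWhile_le _ _
        simp only [List.length_cons] at hlen; omega
      have hL : (1 + ((ys.takeWhile (· == v)).length : Int)).toNat
          = 1 + (ys.takeWhile (· == v)).length := by omega
      rw [pvBGo_cons]
      by_cases hvcur : v = cur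
      · -- run of the current label: every element is copied
        subst hvcur
        rw [if_pos (by simp)]
        have hcopy : pvAGo persist v none 0 ys
            = List.replicate (ys.takeWhile (· == v)).length v
              ++ pvAGo persist v none 0 (ys.dropWhile (· == v)) := by
          conv_lhs => rw [hyd]
          exact pvA_copy persist v _ _ htv
        rw [pvAGo, if_pos (by simp), hcopy, ih _ hrestlen v, hL]
        simp [List.replicate_add]
      · have hvcur' : (v == cur) = false := by
          simp only [beq_eq_false_iff_ne, ne_eq]; exact hvcur
        rw [pvAGo, if_neg (by simp [hvcur'])]
        simp only [show ((none : Option String) == some v) = false from rfl,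
          Bool.false_eq_true, if_false]
        by_cases hP1 : (1 : Int) ≥ persist
        · -- persist = 1: immediate switch on the first differing element
          have hp1 : persist = 1 := by omega
          rw [if_pos (by simpa using hP1)]
          have hcopy : pvAGo persist v none 0 ys
              = List.replicate (ys.takeWhile (· == v)).length v
                ++ pvAGo persist v none 0 (ys.dropWhile (· == v)) := by
            conv_lhs => rw [hyd]
            exact pvA_copy persist v _ _ htv
          rw [hcopy, ih _ hrestlen v]
          rw [if_neg (by first | (simp [hvcur', hp1]; omega) | simp [hvcur', hp1])]
          have e1 : (persist - 1).toNat = 0 := by omega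
          have e2 : (1 + ((ys.takeWhile (· == v)).length : Int) - persist + 1).toNat
              = 1 + (ys.takeWhile (· == v)).length := by omega
          simp only [e1, e2, List.replicate_zero, List.nil_append]
          simp [List.replicate_add]
        · -- persist ≥ 2: pending counter starts at 1
          rw [if_neg (by simpa using hP1)]
          have hrun : pvAGo persist cur (some v) 1 ys
              = if ((1 : Int) + (ys.takeWhile (· == v)).length : Int) ≥ persist then
                  List.replicate (persist - 1 - 1).toNat cur
                    ++ List.replicate (((ys.takeWhile (· == v)).length : Int) - (persist - 1 - 1)).toNat v
                    ++ pvAGo persist v none 0 (ys.dropWhile (· == v))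
                else
                  List.replicate (ys.takeWhile (· == v)).length cur
                    ++ pvAGo persist cur none 0 (ys.dropWhile (· == v)) := by
            conv_lhs => rw [hyd]
            exact pvA_run persist cur v hvcur _ htv 1 (by omega) (by omega) _ hresthead
          rw [hrun]
          by_cases hsw : ((1 : Int) + (ys.takeWhile (· == v)).length : Int) ≥ persist
          · rw [if_pos hsw]
            rw [if_neg (by first | (simp [hvcur']; omega) | simp [hvcur'])]
            rw [ih _ hrestlen v]
            have e1 : (persist - 1).toNat = (persist - 1 - 1).toNat + 1 := by omega
            have e2 : (((ys.takeWhile (· == v)).length : Int) - (persist - 1 - 1)).toNat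
                = (1 + ((ys.takeWhile (· == v)).length : Int) - persist + 1).toNat := by omega
            rw [e1, e2]
            simp [List.replicate_succ]
          · rw [if_neg hsw]
            rw [if_pos (by first | (simp [hvcur']; omega) | simp [hvcur'])]
            rw [ih _ hrestlen cur, hL]
            simp [List.replicate_add]

-- ===== VERDICT (by name: the statement is the Claim_ definition above) =====
theorem smooth_regime_with_hysteresis_spec : Claim_equal_smooth_regime_with_hysteresis := by
  intro raw persist _
  unfold Spec_smooth_regime_with_hysteresis
  cases raw with
  | nil => rfl
  | cons r0 rest =>
    show (rest.foldl (pvAStep (max 1 persist)) ([r0], none, 0)).1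
        = smooth_regime_with_hysteresis_alt (r0 :: rest) persist
    rw [pvA_foldl (max 1 persist) rest [r0] none 0 (by simp)]
    have h1 : ([r0] : List String).getLast! = r0 := by simp [List.getLast!]
    rw [h1]
    show r0 :: pvAGo (max 1 persist) r0 none 0 rest
        = pvBGo (max 1 persist) r0 (r0 :: rest)
    have hstep : pvAGo (max 1 persist) r0 none 0 (r0 :: rest)
        = r0 :: pvAGo (max 1 persist) r0 none 0 rest := by
      rw [pvAGo, if_pos (by simp)]
    rw [← hstep]
    exact pvMain (max 1 persist) (by omega) (r0 :: rest).length (r0 :: rest) le_rfl r0
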